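-- pv_equiv track=rewrite | github.com/siulkilulki/masses | get_utterances.py | get_best_parish_pages
-- ===== SOURCE A (Python) =====
-- def get_best_parish_pages(parish_pages, n=3):
--     def pop_best_and_clear(pages):
--         shortest_url = min(parish_pages.keys(), key=lambda x: len(x))
--         best = pages.pop(shortest_url)
--         for key in list(parish_pages.keys()):
--             if key.startswith(shortest_url):
--                 del pages[key]
--         return best
--
--     best_n = []
--     for i in range(n):
--         if parish_pages:
--             best_n.append(pop_best_and_clear(parish_pages))
--     return best_n
-- ===== SOURCE B (Python) =====
-- def get_best_parish_pages(parish_pages, n=3):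
--     best_n = []
--     chosen = []
--     for key in sorted(parish_pages, key=len):
--         if len(best_n) >= n:
--             break
--         if not any(key.startswith(p) for p in chosen):
--             chosen.append(key)
--             best_n.append(parish_pages[key])
--     for key in [k for k in parish_pages
--                 if any(k.startswith(p) for p in chosen)]:
--         del parish_pages[key]
--     return best_n
-- ===== Notes on version B (the rewrite author's own statement) =====
-- stated objective: alternative
-- what changed: A repeatedly re-scans the dict for the shortest key and sweeps it to delete covered keys each round; B sorts the keys once by length (stable, matching min's first-minimum tie-break) and makes a single walk that skips keys covered by an already-chosen prefix, deleting covered keys once at the end.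
import Mathlib
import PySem

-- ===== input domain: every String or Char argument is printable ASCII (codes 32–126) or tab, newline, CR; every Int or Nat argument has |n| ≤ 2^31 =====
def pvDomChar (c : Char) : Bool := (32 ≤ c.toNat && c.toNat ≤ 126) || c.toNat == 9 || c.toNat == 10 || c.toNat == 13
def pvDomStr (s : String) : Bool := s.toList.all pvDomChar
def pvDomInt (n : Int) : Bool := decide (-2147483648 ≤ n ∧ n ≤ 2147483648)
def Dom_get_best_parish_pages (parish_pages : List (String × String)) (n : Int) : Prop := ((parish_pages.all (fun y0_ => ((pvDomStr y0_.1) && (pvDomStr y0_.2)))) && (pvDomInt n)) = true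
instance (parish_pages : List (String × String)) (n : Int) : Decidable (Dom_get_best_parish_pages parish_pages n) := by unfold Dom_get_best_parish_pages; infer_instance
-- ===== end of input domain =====

-- B replaces A's repeated min-scan + per-round deletion sweep with ONE stable sort by
-- length followed by a single walk keeping the chosen prefixes (objective: alternative).
-- Both A and B mutate the dict argument identically in Python; the equivalence proved
-- here is about the RETURN value.

-- ===== PORT A =====
-- helper pop_best_and_clear: pick shortest key (first minimal), pop it, delete every
-- key that startswith it; the 'none' match arms are unreachable (the dict is nonempty
-- and the minimal key is present) and only make the port total.
def pvPopBestStep (d : PySem.Dict String String) (best : List String) :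
    PySem.Dict String String × List String :=
  match PySem.List.min? d.keys (fun x => PySem.Str.len x) with
  | none => (d, best)
  | some shortest =>
    match d.pop? shortest with
    | none => (d, best)
    | some (b, d1) =>
      (d1.keys.foldl (fun dd k => if PySem.Str.startswith k shortest then dd.erase k else dd) d1,
       best ++ [b])

def get_best_parish_pages (parish_pages : List (String × String)) (n : Int) : List String :=
  let d0 := PySem.Dict.ofList parish_pages
  ((PySem.List.pyRange 0 n 1).foldl
      (fun st _ => if st.1.size ≠ 0 then pvPopBestStep st.1 st.2 else st)
      (d0, [])).2

-- ===== PORT B =====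
def pvCovered (chosen : List String) (k : String) : Bool :=
  chosen.any (fun p => PySem.Str.startswith k p)

-- the for-loop of B with break: walk the length-sorted keys; 'd.getD k ""' is exact
-- because every walked key is a key of d (Python's parish_pages[key] cannot miss).
def pvSelectWalk (d : PySem.Dict String String) (n : Int) :
    List String → List String → List String → List String
  | [], _, best => best
  | k :: rest, chosen, best =>
    if (best.length : Int) ≥ n then best
    else if pvCovered chosen k then pvSelectWalk d n rest chosen best
    else pvSelectWalk d n rest (chosen ++ [k]) (best ++ [d.getD k ""])

def get_best_parish_pages_alt (parish_pages : List (String × String)) (n : Int) : List String :=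
  let d := PySem.Dict.ofList parish_pages
  pvSelectWalk d n (PySem.List.sorted d.keys (fun x => PySem.Str.len x) false) [] []

-- ===== PRECONDITION & SPEC =====
def Spec_get_best_parish_pages (parish_pages : List (String × String)) (n : Int) (out : List String) : Prop := out = get_best_parish_pages_alt parish_pages n
instance (parish_pages : List (String × String)) (n : Int) (out : List String) : Decidable (Spec_get_best_parish_pages parish_pages n out) := by unfold Spec_get_best_parish_pages; infer_instance

-- ===== CLAIM (what is proved, stated in full; the proofs are below) =====
def Claim_equal_get_best_parish_pages : Prop := ∀ (parish_pages : List (String × String)) (n : Int), Dom_get_best_parish_pages parish_pages n → Spec_get_best_parish_pages parish_pages n (get_best_parish_pages parish_pages n)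

-- ===== LEMMAS AND PROOFS =====

-- abbreviation for the sort key and the insertion 'before' test
def pvB (a b : String) : Bool := decide (PySem.Str.len a < PySem.Str.len b)

def pvLe (a b : String) : Prop := PySem.Str.len a ≤ PySem.Str.len b

-- the loop of A in cons-producing form
def pvALoop : PySem.Dict String String → Nat → List String
  | _, 0 => []
  | d, (m+1) =>
    if d.size = 0 then []
    else
      match PySem.List.min? d.keys (fun x => PySem.Str.len x) with
      | none => []
      | some s =>
        match d.pop? s with
        | none => []
        | some (b, d1) =>
          b :: pvALoop (d1.keys.foldl (fun dd k => if PySem.Str.startswith k s then dd.erase k else dd) d1) m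

-- the walk of B in cons-producing, remaining-budget form
def pvWalkAux (d : PySem.Dict String String) : List String → List String → Int → List String
  | [], _, _ => []
  | k :: rest, chosen, r =>
    if r ≤ 0 then []
    else if pvCovered chosen k then pvWalkAux d rest chosen r
    else d.getD k "" :: pvWalkAux d rest (chosen ++ [k]) (r - 1)

theorem pvWalkAux_nonpos (d : PySem.Dict String String) (l chosen : List String) (r : Int)
    (h : r ≤ 0) : pvWalkAux d l chosen r = [] := by
  cases l <;> simp [pvWalkAux, h]


theorem pvSelectWalk_eq (d : PySem.Dict String String) (n : Int) :
    ∀ (order chosen best : List String),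
      pvSelectWalk d n order chosen best = best ++ pvWalkAux d order chosen (n - best.length) := by
  intro order
  induction order with
  | nil => intro chosen best; simp [pvSelectWalk, pvWalkAux]
  | cons k rest ih =>
    intro chosen best
    by_cases hr : (best.length : Int) ≥ n
    · have h0 : n - (best.length : Int) ≤ 0 := by omega
      simp [pvSelectWalk, pvWalkAux, hr, h0]
    · have h0 : ¬ (n - (best.length : Int) ≤ 0) := by omega
      by_cases hc : pvCovered chosen k
      · simp [pvSelectWalk, pvWalkAux, hr, h0, hc, ih]
      · have e1 : pvSelectWalk d n (k :: rest) chosen best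
            = pvSelectWalk d n rest (chosen ++ [k]) (best ++ [d.getD k ""]) := by
          simp [pvSelectWalk, hr, hc]
        have e2 : pvWalkAux d (k :: rest) chosen (n - best.length)
            = d.getD k "" :: pvWalkAux d rest (chosen ++ [k]) (n - best.length - 1) := by
          simp [pvWalkAux, h0, hc]
        have hlen : n - ((best ++ [d.getD k ""]).length : Int) = n - (best.length : Int) - 1 := by
          simp [List.length_append]; ring
        rw [e1, e2, ih, hlen, List.append_assoc]
        rfl


theorem pvALoop_fold : ∀ (l : List Int) (d : PySem.Dict String String) (best : List String),
    (l.foldl (fun st (_ : Int) => if st.1.size ≠ 0 then pvPopBestStep st.1 st.2 else st) (d, best)).2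
      = best ++ pvALoop d l.length := by
  intro l
  induction l with
  | nil => intro d best; simp [pvALoop]
  | cons a t ih =>
    intro d best
    simp only [List.foldl_cons]
    by_cases hsz : d.size = 0
    · rw [if_neg (show ¬ d.size ≠ 0 from not_not_intro hsz)]
      rw [ih d best]
      have h0 : ∀ m, pvALoop d m = [] := by
        intro m
        cases m with
        | zero => rfl
        | succ m => simp [pvALoop, hsz]
      rw [h0, h0]
    · have hkeys : d.keys ≠ [] := by
        intro h
        apply hsz
        have h' : d.items.map Prod.fst = [] := by simpa [PySem.Dict.keys] using h
        have hitems : d.items = [] := List.map_eq_nil_iff.mp h'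
        simp [PySem.Dict.size, hitems]
      obtain ⟨s, hmin⟩ : ∃ s, PySem.List.min? d.keys (fun x => PySem.Str.len x) = some s := by
        cases hm : PySem.List.min? d.keys (fun x => PySem.Str.len x) with
        | none =>
          rw [PySem.List.min?_eq_none_iff] at hm
          exact absurd hm hkeys
        | some s => exact ⟨s, rfl⟩
      have hmem : s ∈ d.keys := PySem.List.min?_mem hmin
      obtain ⟨v, hget⟩ : ∃ v, d.get? s = some v := by
        cases hg : d.get? s with
        | none =>
          rw [PySem.Dict.get?_eq_none_iff_not_mem_keys] at hg
          exact absurd hmem hg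
        | some v => exact ⟨v, rfl⟩
      have hpop : d.pop? s = some (v, d.erase s) := by
        simp [PySem.Dict.pop?, hget]
      rw [if_pos hsz,
        show pvPopBestStep d best
          = ((d.erase s).keys.foldl
              (fun dd k => if PySem.Str.startswith k s then dd.erase k else dd) (d.erase s),
             best ++ [v]) by
          unfold pvPopBestStep
          rw [hmin]
          dsimp only
          rw [hpop]]
      rw [ih]
      rw [List.length_cons,
        show pvALoop d (t.length + 1)
          = v :: pvALoop ((d.erase s).keys.foldl
              (fun dd k => if PySem.Str.startswith k s then dd.erase k else dd) (d.erase s)) t.length by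
          unfold pvALoop
          rw [if_neg hsz, hmin]
          dsimp only
          rw [hpop]
          dsimp only
          rw [pvALoop.eq_def]]
      rw [List.append_assoc]
      rfl


theorem pvCovered_append (C : List String) (s k : String) :
    pvCovered (C ++ [s]) k = (pvCovered C k || PySem.Str.startswith k s) := by
  simp [pvCovered, List.any_append]


theorem pvWalkAux_congr (d : PySem.Dict String String) :
    ∀ (l C1 C2 : List String) (r : Int), (∀ k, pvCovered C1 k = pvCovered C2 k) →
      pvWalkAux d l C1 r = pvWalkAux d l C2 r := by
  intro l
  induction l with
  | nil => intro C1 C2 r h; simp [pvWalkAux]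
  | cons k rest ih =>
    intro C1 C2 r h
    by_cases hr : r ≤ 0
    · simp [pvWalkAux, hr]
    · by_cases hc : pvCovered C1 k
      · have hc2 : pvCovered C2 k := by rw [← h]; exact hc
        simp [pvWalkAux, hr, hc, hc2, ih _ _ _ h]
      · have hc2 : ¬ pvCovered C2 k := by rw [← h]; exact hc
        have h' : ∀ x, pvCovered (C1 ++ [k]) x = pvCovered (C2 ++ [k]) x := by
          intro x; rw [pvCovered_append, pvCovered_append, h]
        simp [pvWalkAux, hr, hc, hc2, ih _ _ _ h']


theorem pvWalkAux_absorb (d : PySem.Dict String String) :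
    ∀ (l C : List String) (s : String) (r : Int),
      pvWalkAux d l (C ++ [s]) r
        = pvWalkAux d (l.filter (fun k => !PySem.Str.startswith k s)) C r := by
  intro l
  induction l with
  | nil => intro C s r; simp [pvWalkAux]
  | cons k rest ih =>
    intro C s r
    by_cases hr : r ≤ 0
    · rw [pvWalkAux_nonpos _ _ _ _ hr, pvWalkAux_nonpos _ _ _ _ hr]
    · by_cases hs : PySem.Str.startswith k s
      · have hc : pvCovered (C ++ [s]) k = true := by
          rw [pvCovered_append, hs]; simp
        have hfc : List.filter (fun x => !PySem.Str.startswith x s) (k :: rest)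
            = List.filter (fun x => !PySem.Str.startswith x s) rest := by
          rw [List.filter_cons_of_neg (by rw [hs]; decide)]
        calc pvWalkAux d (k :: rest) (C ++ [s]) r
            = pvWalkAux d rest (C ++ [s]) r := by
              simp only [pvWalkAux]; rw [if_neg hr, if_pos hc]
          _ = pvWalkAux d (List.filter (fun x => !PySem.Str.startswith x s) rest) C r := ih C s r
          _ = pvWalkAux d (List.filter (fun x => !PySem.Str.startswith x s) (k :: rest)) C r := by
              rw [hfc]
      · have hsf : PySem.Str.startswith k s = false := by rwa [Bool.not_eq_true] at hs
        have hc : pvCovered (C ++ [s]) k = pvCovered C k := by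
          rw [pvCovered_append, hsf, Bool.or_false]
        have hfc : List.filter (fun x => !PySem.Str.startswith x s) (k :: rest)
            = k :: List.filter (fun x => !PySem.Str.startswith x s) rest := by
          rw [List.filter_cons_of_pos (by rw [hsf]; rfl)]
        by_cases hck : pvCovered C k
        · have hc1 : pvCovered (C ++ [s]) k = true := by rw [hc]; exact hck
          calc pvWalkAux d (k :: rest) (C ++ [s]) r
              = pvWalkAux d rest (C ++ [s]) r := by
                simp only [pvWalkAux]; rw [if_neg hr, if_pos hc1]
            _ = pvWalkAux d (List.filter (fun x => !PySem.Str.startswith x s) rest) C r := ih C s r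
            _ = pvWalkAux d (k :: List.filter (fun x => !PySem.Str.startswith x s) rest) C r := by
                simp only [pvWalkAux]; rw [if_neg hr, if_pos hck]
            _ = pvWalkAux d (List.filter (fun x => !PySem.Str.startswith x s) (k :: rest)) C r := by
                rw [hfc]
        · have hc1 : ¬ (pvCovered (C ++ [s]) k = true) := by rw [hc]; exact hck
          calc pvWalkAux d (k :: rest) (C ++ [s]) r
              = d.getD k "" :: pvWalkAux d rest ((C ++ [s]) ++ [k]) (r - 1) := by
                simp only [pvWalkAux]; rw [if_neg hr, if_neg hc1]
            _ = d.getD k "" :: pvWalkAux d rest ((C ++ [k]) ++ [s]) (r - 1) := by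
                rw [pvWalkAux_congr d rest ((C ++ [s]) ++ [k]) ((C ++ [k]) ++ [s]) (r - 1)
                    (by intro x
                        simp only [pvCovered_append]
                        rw [Bool.or_assoc, Bool.or_assoc, Bool.or_comm (PySem.Str.startswith x s)])]
            _ = d.getD k "" :: pvWalkAux d (List.filter (fun x => !PySem.Str.startswith x s) rest) (C ++ [k]) (r - 1) := by
                rw [ih (C ++ [k]) s (r - 1)]
            _ = pvWalkAux d (k :: List.filter (fun x => !PySem.Str.startswith x s) rest) C r := by
                simp only [pvWalkAux]; rw [if_neg hr, if_neg hck]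
            _ = pvWalkAux d (List.filter (fun x => !PySem.Str.startswith x s) (k :: rest)) C r := by
                rw [hfc]


-- insertion-sort step facts
theorem pvIns_cons (x y : String) (ys : List String) :
    PySem.List.insertBy pvB x (y :: ys)
      = if pvB x y then x :: y :: ys else y :: PySem.List.insertBy pvB x ys := by
  simp [PySem.List.insertBy]

theorem pvIns_pairwise (x : String) (acc : List String) (h : acc.Pairwise pvLe) :
    (PySem.List.insertBy pvB x acc).Pairwise pvLe := by
  induction acc with
  | nil => simp [PySem.List.insertBy]
  | cons y ys ih =>
    rcases List.pairwise_cons.mp h with ⟨hy, hys⟩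
    by_cases hb : pvB x y
    · rw [show PySem.List.insertBy pvB x (y :: ys) = x :: y :: ys by simp [PySem.List.insertBy, hb]]
      refine List.pairwise_cons.mpr ⟨?_, h⟩
      intro z hz
      have hxy : PySem.Str.len x < PySem.Str.len y := of_decide_eq_true hb
      rcases List.mem_cons.mp hz with rfl | hz'
      · exact le_of_lt hxy
      · exact le_of_lt (lt_of_lt_of_le hxy (hy z hz'))
    · rw [show PySem.List.insertBy pvB x (y :: ys) = y :: PySem.List.insertBy pvB x ys by
          simp [PySem.List.insertBy, hb]]
      refine List.pairwise_cons.mpr ⟨?_, ih hys⟩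
      intro z hz
      rcases (PySem.List.mem_insertBy _ _ _ _).mp hz with rfl | hz'
      · have : ¬ PySem.Str.len z < PySem.Str.len y := by
          intro hlt; exact hb (decide_eq_true hlt)
        exact le_of_not_gt this
      · exact hy z hz'


theorem pvIns_head (x : String) (zs : List String)
    (h : ∀ z ∈ zs, PySem.Str.len x < PySem.Str.len z) :
    PySem.List.insertBy pvB x zs = x :: zs := by
  cases zs with
  | nil => by_cases hq : True <;> simp [PySem.List.insertBy]
  | cons z zs =>
    have hb : pvB x z = true := decide_eq_true (h z (List.mem_cons_self))
    simp [PySem.List.insertBy, hb]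


theorem pvIns_filter (q : String → Bool) (x : String) (acc : List String) (h : acc.Pairwise pvLe) :
    (PySem.List.insertBy pvB x acc).filter q
      = if q x then PySem.List.insertBy pvB x (acc.filter q) else acc.filter q := by
  induction acc with
  | nil =>
    by_cases hq : q x <;> simp [PySem.List.insertBy, hq]
  | cons y ys ih =>
    rcases List.pairwise_cons.mp h with ⟨hy, hys⟩
    by_cases hb : pvB x y
    · have hins : PySem.List.insertBy pvB x (y :: ys) = x :: y :: ys := by
        simp [PySem.List.insertBy, hb]
      have hxy : PySem.Str.len x < PySem.Str.len y := of_decide_eq_true hb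
      have hlt : ∀ z ∈ (y :: ys).filter q, PySem.Str.len x < PySem.Str.len z := by
        intro z hz
        rcases List.mem_cons.mp (List.mem_of_mem_filter hz) with rfl | hz'
        · exact hxy
        · exact lt_of_lt_of_le hxy (hy z hz')
      rw [hins]
      by_cases hq : q x
      · rw [List.filter_cons_of_pos hq, if_pos hq, pvIns_head x _ hlt]
      · rw [List.filter_cons_of_neg (by simp [hq]), if_neg hq]
    · have hins : PySem.List.insertBy pvB x (y :: ys) = y :: PySem.List.insertBy pvB x ys := by
        simp [PySem.List.insertBy, hb]
      rw [hins]
      by_cases hqy : q y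
      · rw [List.filter_cons_of_pos hqy, List.filter_cons_of_pos hqy, ih hys]
        by_cases hqx : q x
        · rw [if_pos hqx, if_pos hqx,
            show PySem.List.insertBy pvB x (y :: ys.filter q) = y :: PySem.List.insertBy pvB x (ys.filter q) by
              simp [PySem.List.insertBy, hb]]
        · rw [if_neg hqx, if_neg hqx]
      · rw [List.filter_cons_of_neg (by simp [hqy]), List.filter_cons_of_neg (by simp [hqy]), ih hys]


theorem pvSortFold_filter (q : String → Bool) :
    ∀ (xs acc : List String), acc.Pairwise pvLe →
      (xs.foldl (fun a x => PySem.List.insertBy pvB x a) acc).filter q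
        = (xs.filter q).foldl (fun a x => PySem.List.insertBy pvB x a) (acc.filter q) := by
  intro xs
  induction xs with
  | nil => intro acc h; simp
  | cons x xs ih =>
    intro acc h
    simp only [List.foldl_cons]
    rw [ih (PySem.List.insertBy pvB x acc) (pvIns_pairwise x acc h), pvIns_filter q x acc h]
    by_cases hq : q x
    · rw [if_pos hq, List.filter_cons_of_pos hq, List.foldl_cons]
    · rw [if_neg hq, List.filter_cons_of_neg (by simp [hq])]


theorem pvSorted_filter (q : String → Bool) (xs : List String) :
    (PySem.List.sorted xs (fun x => PySem.Str.len x) false).filter q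
      = PySem.List.sorted (xs.filter q) (fun x => PySem.Str.len x) false := by
  have hs : ∀ (ys : List String), PySem.List.sorted ys (fun x => PySem.Str.len x) false
      = ys.foldl (fun a x => PySem.List.insertBy pvB x a) [] := by
    intro ys
    unfold PySem.List.sorted
    congr 1
  rw [hs, hs]
  exact pvSortFold_filter q xs [] List.Pairwise.nil


theorem pvMinStep_head (x : String) (acc : List String) :
    (match acc.head? with
      | none => some x
      | some m => if PySem.Str.len x < PySem.Str.len m then some x else some m)
      = (PySem.List.insertBy pvB x acc).head? := by
  cases acc with
  | nil => simp [PySem.List.insertBy]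
  | cons y ys =>
    show (if PySem.Str.len x < PySem.Str.len y then some x else some y)
        = (PySem.List.insertBy pvB x (y :: ys)).head?
    rw [pvIns_cons]
    by_cases hb : PySem.Str.len x < PySem.Str.len y
    · rw [if_pos hb, if_pos (show pvB x y = true from decide_eq_true hb)]
      rfl
    · rw [if_neg hb, if_neg (show ¬ pvB x y = true from by simpa [pvB] using hb)]
      rfl


theorem pvMinFold_head :
    ∀ (xs acc : List String), acc.Pairwise pvLe →
      (xs.foldl (fun a x =>
          match a with
          | none => some x
          | some m => if PySem.Str.len x < PySem.Str.len m then some x else some m) acc.head?)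
        = ((xs.foldl (fun a x => PySem.List.insertBy pvB x a) acc).head?) := by
  intro xs
  induction xs with
  | nil => intro acc h; simp
  | cons x xs ih =>
    intro acc h
    simp only [List.foldl_cons]
    rw [pvMinStep_head x acc]
    exact ih (PySem.List.insertBy pvB x acc) (pvIns_pairwise x acc h)


theorem pvMin_eq_head_sorted (xs : List String) :
    PySem.List.min? xs (fun x => PySem.Str.len x)
      = (PySem.List.sorted xs (fun x => PySem.Str.len x) false).head? := by
  have h1 : PySem.List.min? xs (fun x => PySem.Str.len x)
      = xs.foldl (fun a x =>
          match a with
          | none => some x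
          | some m => if PySem.Str.len x < PySem.Str.len m then some x else some m) none := by
    unfold PySem.List.min?
    congr 1
    funext a x
    cases a <;> rfl
  have h2 : PySem.List.sorted xs (fun x => PySem.Str.len x) false
      = xs.foldl (fun a x => PySem.List.insertBy pvB x a) [] := by
    unfold PySem.List.sorted
    congr 1
  rw [h1, h2]
  exact pvMinFold_head xs [] List.Pairwise.nil


-- dict facts


theorem pvStartswith_self (s : String) : PySem.Str.startswith s s = true := by
  simp only [PySem.Str.startswith_eq]
  exact (PySem.Chars.startswith_iff _ _).mpr (List.prefix_refl _)


theorem pvEraseFold (sw : String → Bool) :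
    ∀ (ks : List String) (d : PySem.Dict String String),
      (ks.foldl (fun dd k => if sw k then dd.erase k else dd) d).items
        = d.items.filter (fun p => !(decide (p.1 ∈ ks) && sw p.1)) := by
  intro ks
  induction ks with
  | nil =>
    intro d
    simp
  | cons k ks ih =>
    intro d
    by_cases hk : sw k
    · simp only [List.foldl_cons, if_pos hk]
      rw [ih (d.erase k),
        show (d.erase k).items = d.items.filter (fun p => !(p.1 == k)) from rfl,
        List.filter_filter]
      apply List.filter_congr
      intro p hp
      by_cases hpk : p.1 = k
      · simp [hpk, hk]
      · simp [hpk, hk]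
    · simp only [List.foldl_cons, if_neg hk]
      rw [ih d]
      apply List.filter_congr
      intro p hp
      have hkf : sw k = false := Bool.eq_false_iff.mpr hk
      by_cases hpk : p.1 = k
      · simp [hpk, hkf, List.mem_cons]
      · simp [hpk, List.mem_cons]


theorem pvClear_items (d : PySem.Dict String String) (s : String) :
    ((d.erase s).keys.foldl
        (fun dd k => if PySem.Str.startswith k s then dd.erase k else dd) (d.erase s)).items
      = d.items.filter (fun p => !PySem.Str.startswith p.1 s) := by
  rw [pvEraseFold]
  have h1 : ((d.erase s).items.filter
      (fun p => !(decide (p.1 ∈ (d.erase s).keys) && PySem.Str.startswith p.1 s)))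
      = (d.erase s).items.filter (fun p => !PySem.Str.startswith p.1 s) := by
    apply List.filter_congr
    intro p hp
    have hmem : p.1 ∈ (d.erase s).keys := by
      have hpp : (p.1, p.2) ∈ (d.erase s).items := hp
      simp only [PySem.Dict.keys, List.mem_map]
      exact ⟨p, hp, rfl⟩
    rw [decide_eq_true hmem, Bool.true_and]
  rw [h1, show (d.erase s).items = d.items.filter (fun p => !(p.1 == s)) from rfl,
    List.filter_filter]
  apply List.filter_congr
  intro p hp
  by_cases hps : p.1 = s
  · rw [hps]
    have hsw := pvStartswith_self s
    simp only [PySem.Str.startswith_eq] at hsw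
    simp [hsw]
  · simp [hps]


theorem pvMap_fst_filter (q : String → Bool) (l : List (String × String)) :
    (l.filter (fun p => q p.1)).map Prod.fst = (l.map Prod.fst).filter q := by
  induction l with
  | nil => rfl
  | cons p l ih =>
    by_cases hq : q p.1 <;> simp [hq, ih]


theorem pvMain (d0 : PySem.Dict String String) :
    ∀ (m : Nat) (d : PySem.Dict String String), d.keys.Nodup →
      (∀ k, k ∈ d.keys → d.getD k "" = d0.getD k "") →
      pvALoop d m
        = pvWalkAux d0 (PySem.List.sorted d.keys (fun x => PySem.Str.len x) false) [] (m : Int) := by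
  intro m
  induction m with
  | zero =>
    intro d hnd hcomp
    rw [pvWalkAux_nonpos d0 _ [] _ (by simp)]
    rfl
  | succ m ih =>
    intro d hnd hcomp
    by_cases hsz : d.size = 0
    · have hitems : d.items = [] := by
        simp only [PySem.Dict.size] at hsz
        exact List.eq_nil_of_length_eq_zero hsz
      have hkeys : d.keys = [] := by simp [PySem.Dict.keys, hitems]
      rw [show pvALoop d (m + 1) = [] from by unfold pvALoop; rw [if_pos hsz], hkeys]
      rfl
    · have hkeys : d.keys ≠ [] := by
        intro h
        apply hsz
        have hitems : d.items = [] :=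
          List.map_eq_nil_iff.mp (show d.items.map Prod.fst = [] from by simpa [PySem.Dict.keys] using h)
        simp [PySem.Dict.size, hitems]
      obtain ⟨s, hmin⟩ : ∃ s, PySem.List.min? d.keys (fun x => PySem.Str.len x) = some s := by
        cases hm : PySem.List.min? d.keys (fun x => PySem.Str.len x) with
        | none =>
          rw [PySem.List.min?_eq_none_iff] at hm
          exact absurd hm hkeys
        | some s => exact ⟨s, rfl⟩
      have hmem : s ∈ d.keys := PySem.List.min?_mem hmin
      obtain ⟨v, hget⟩ : ∃ v, d.get? s = some v := by
        cases hg : d.get? s with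
        | none =>
          rw [PySem.Dict.get?_eq_none_iff_not_mem_keys] at hg
          exact absurd hmem hg
        | some v => exact ⟨v, rfl⟩
      have hpop : d.pop? s = some (v, d.erase s) := by
        simp [PySem.Dict.pop?, hget]
      have hhead : (PySem.List.sorted d.keys (fun x => PySem.Str.len x) false).head? = some s := by
        rw [← pvMin_eq_head_sorted, hmin]
      obtain ⟨t, hst⟩ : ∃ t, PySem.List.sorted d.keys (fun x => PySem.Str.len x) false = s :: t := by
        cases hs0 : PySem.List.sorted d.keys (fun x => PySem.Str.len x) false with
        | nil => rw [hs0] at hhead; exact absurd hhead (by simp)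
        | cons a t =>
          rw [hs0] at hhead
          simp only [List.head?_cons, Option.some.injEq] at hhead
          exact ⟨t, by rw [hhead]⟩
      -- the cleared dict
      have hLHS : pvALoop d (m + 1)
          = v :: pvALoop ((d.erase s).keys.foldl
              (fun dd k => if PySem.Str.startswith k s then dd.erase k else dd) (d.erase s)) m := by
        unfold pvALoop
        rw [if_neg hsz, hmin]
        dsimp only
        rw [hpop]
        dsimp only
        rw [pvALoop.eq_def]
      set d'' := (d.erase s).keys.foldl
          (fun dd k => if PySem.Str.startswith k s then dd.erase k else dd) (d.erase s) with hd''
      have hd''items : d''.items = d.items.filter (fun p => !PySem.Str.startswith p.1 s) :=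
        pvClear_items d s
      have hd''keys : d''.keys = d.keys.filter (fun k => !PySem.Str.startswith k s) := by
        show d''.items.map Prod.fst = (d.items.map Prod.fst).filter (fun k => !PySem.Str.startswith k s)
        rw [hd''items]
        exact pvMap_fst_filter (fun k => !PySem.Str.startswith k s) d.items
      have hnd'' : d''.keys.Nodup := by
        rw [hd''keys]
        exact hnd.filter _
      have hcomp'' : ∀ k, k ∈ d''.keys → d''.getD k "" = d0.getD k "" := by
        intro k hk
        obtain ⟨p, hp, hp1⟩ : ∃ p, p ∈ d''.items ∧ p.1 = k := by
          have := hk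
          simp only [PySem.Dict.keys, List.mem_map] at this
          exact this
        obtain ⟨w, hw⟩ : ∃ w, (k, w) ∈ d''.items := ⟨p.2, by rw [← hp1]; exact hp⟩
        have hwd : (k, w) ∈ d.items := List.mem_of_mem_filter (hd''items ▸ hw)
        have h1 : d''.getD k "" = w := PySem.Dict.getD_of_mem_items d'' hw hnd'' ""
        have h2 : d.getD k "" = w := PySem.Dict.getD_of_mem_items d hwd hnd ""
        have hkd : k ∈ d.keys := by
          simp only [PySem.Dict.keys, List.mem_map]
          exact ⟨(k, w), hwd, rfl⟩
        rw [h1, ← h2]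
        exact hcomp k hkd
      have hsorted'' : PySem.List.sorted d''.keys (fun x => PySem.Str.len x) false
          = t.filter (fun k => !PySem.Str.startswith k s) := by
        rw [hd''keys, ← pvSorted_filter, hst,
          List.filter_cons_of_neg (by rw [pvStartswith_self]; decide)]
      have hv : d0.getD s "" = v := by
        rw [← hcomp s hmem, PySem.Dict.getD_eq_get?_getD, hget]
        rfl
      have hr : ¬ ((((m + 1 : ℕ)) : ℤ) ≤ 0) := by push_cast; omega
      have hr1 : (((m + 1 : ℕ)) : ℤ) - 1 = (m : ℤ) := by push_cast; ring
      rw [hLHS, hst]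
      rw [show pvWalkAux d0 (s :: t) [] ((m + 1 : ℕ) : ℤ)
          = d0.getD s "" :: pvWalkAux d0 t ([] ++ [s]) ((((m + 1 : ℕ)) : ℤ) - 1) from by
        unfold pvWalkAux
        rw [if_neg hr, if_neg (show ¬ pvCovered [] s = true from by simp [pvCovered])]
        rw [← pvWalkAux.eq_def]]
      rw [pvWalkAux_absorb d0 t [] s, hr1, hv, ← hsorted'']
      exact congrArg _ (ih d'' hnd'' hcomp'')



-- ===== VERDICT (by name: the statement is the Claim_ definition above) =====
theorem get_best_parish_pages_spec : Claim_equal_get_best_parish_pages := by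
  unfold Claim_equal_get_best_parish_pages Spec_get_best_parish_pages
  intro pp n _
  rw [show get_best_parish_pages pp n
      = ((PySem.List.pyRange 0 n 1).foldl
          (fun st (_ : Int) => if st.1.size ≠ 0 then pvPopBestStep st.1 st.2 else st)
          (PySem.Dict.ofList pp, [])).2 from rfl]
  rw [pvALoop_fold (PySem.List.pyRange 0 n 1) (PySem.Dict.ofList pp) []]
  rw [show get_best_parish_pages_alt pp n
      = pvSelectWalk (PySem.Dict.ofList pp) n
          (PySem.List.sorted (PySem.Dict.ofList pp).keys (fun x => PySem.Str.len x) false) [] []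
      from rfl]
  rw [pvSelectWalk_eq]
  simp only [List.nil_append, List.length_nil, Nat.cast_zero, sub_zero]
  have hlen : (PySem.List.pyRange 0 n 1).length = n.toNat := by
    rw [PySem.List.length_pyRange_one]
    simp
  rw [hlen]
  by_cases hn : 0 ≤ n
  · have hcast : ((n.toNat : ℕ) : ℤ) = n := Int.toNat_of_nonneg hn
    rw [← hcast]
    exact pvMain (PySem.Dict.ofList pp) n.toNat (PySem.Dict.ofList pp)
      (PySem.Dict.nodup_keys_ofList pp) (fun k _ => rfl)
  · have h1 : n.toNat = 0 := Int.toNat_of_nonpos (le_of_not_ge hn)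
    rw [h1, pvWalkAux_nonpos _ _ _ _ (by omega)]
    rfl
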